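-- pv_equiv track=rewrite | github.com/Jemimacat/hackthonBLAT | index.py | seed_list_of_query_generating
-- ===== SOURCE A (Python) =====
-- def seed_list_of_query_generating(query_seq,w=11):
--     one_seed = {}
--     for i in range(len(query_seq)):
--         if i+w <= len(query_seq):
--             word = query_seq[i:i+w]
--         else:
--             word = query_seq[i:len(query_seq)] + 'N'*(w+i-len(query_seq))
--         if not word in one_seed:
--             one_seed[word] = []
--         one_seed[word].append(i)
--     return one_seed
-- ===== SOURCE B (Python) =====
-- def seed_list_of_query_generating(query_seq, w=11):
--     # Staged algorithm: materialize all windows, dedup the keys, then collect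
--     # the positions of each distinct key by a per-key scan (no incremental dict building).
--     n = len(query_seq)
--     windows = []
--     for i in range(n):
--         sl = query_seq[i:i+w]
--         windows.append(sl + 'N' * (w - len(sl)))
--     one_seed = {}
--     for word in dict.fromkeys(windows):
--         one_seed[word] = [i for i, x in enumerate(windows) if x == word]
--     return one_seed
-- ===== Notes on version B (the rewrite author's own statement) =====
-- stated objective: alternative
-- what changed: B is a staged algorithm: it materializes the list of all padded windows first, deduplicates it to get the distinct keys in first-occurrence order, and then builds each key's position list by a separate scan over the enumerated windows, instead of A's single pass that grows a dict incrementally with an in-loop membership test and padding branch.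
import Mathlib
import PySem

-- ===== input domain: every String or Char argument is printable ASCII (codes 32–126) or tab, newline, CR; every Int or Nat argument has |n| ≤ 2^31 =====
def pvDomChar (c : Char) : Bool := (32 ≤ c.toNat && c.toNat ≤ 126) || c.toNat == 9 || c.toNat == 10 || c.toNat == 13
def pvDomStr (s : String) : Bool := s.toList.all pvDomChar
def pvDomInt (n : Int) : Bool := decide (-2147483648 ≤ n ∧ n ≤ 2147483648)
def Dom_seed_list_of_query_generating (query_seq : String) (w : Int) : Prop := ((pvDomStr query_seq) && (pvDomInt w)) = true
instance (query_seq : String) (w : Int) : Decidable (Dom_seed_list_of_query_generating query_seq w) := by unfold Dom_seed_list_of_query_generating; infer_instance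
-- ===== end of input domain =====

-- B is a staged algorithm (materialize all windows, dedup the keys, then collect each key's
-- positions by a per-key scan) instead of A's single-pass incremental dict; objective: alternative.

-- ===== PORT A =====
-- A, step for step: incremental dict word -> positions; tail windows padded with 'N' inside the loop.
-- 'N'*(k) with possibly negative k is List.replicate k.toNat 'N' (Python repeats 0 times for k ≤ 0) — exact.
def seed_list_of_query_generating (query_seq : String) (w : Int) : List (String × List Int) :=
  let cs := query_seq.toList
  let L : Int := PySem.List.len cs
  (((PySem.List.pyRange 0 L 1).foldl (fun (d : PySem.Dict (List Char) (List Int)) i =>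
      let word : List Char :=
        if i + w ≤ L then PySem.List.slice cs (some i) (some (i + w))
        else PySem.List.slice cs (some i) (some L) ++ List.replicate (w + i - L).toNat 'N'
      let d := if d.contains word then d else d.insert word []
      d.modify word [] (· ++ [i]))
    PySem.Dict.empty).items).map (fun p => (String.ofList p.1, p.2))

-- ===== PORT B =====
-- helper _window of Source B
def pvWindowB (cs : List Char) (w : Int) (i : Int) : List Char :=
  let sl := PySem.List.slice cs (some i) (some (i + w))
  sl ++ List.replicate (w - PySem.List.len sl).toNat 'N'

def seed_list_of_query_generating_alt (query_seq : String) (w : Int) : List (String × List Int) :=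
  let cs := query_seq.toList
  let windows := (PySem.List.pyRange 0 (PySem.List.len cs) 1).map (pvWindowB cs w)
  (((PySem.List.dedup windows).foldl (fun (d : PySem.Dict (List Char) (List Int)) word =>
      d.insert word (((PySem.List.enumerate windows 0).filter (fun p => p.2 == word)).map (·.1)))
    PySem.Dict.empty).items).map (fun p => (String.ofList p.1, p.2))

-- ===== PRECONDITION & SPEC =====
def Spec_seed_list_of_query_generating (query_seq : String) (w : Int) (out : List (String × List Int)) : Prop := out = seed_list_of_query_generating_alt query_seq w
instance (query_seq : String) (w : Int) (out : List (String × List Int)) : Decidable (Spec_seed_list_of_query_generating query_seq w out) := by unfold Spec_seed_list_of_query_generating; infer_instance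

-- ===== CLAIM (what is proved, stated in full; the proofs are below) =====
def Claim_equal_seed_list_of_query_generating : Prop := ∀ (query_seq : String) (w : Int), Dom_seed_list_of_query_generating query_seq w → Spec_seed_list_of_query_generating query_seq w (seed_list_of_query_generating query_seq w)

-- ===== LEMMAS AND PROOFS =====

-- A's branched window equals B's pad-to-width window at every loop index.
lemma window_eq (cs : List Char) (w i : Int) (h0 : 0 ≤ i) (hL : i < PySem.List.len cs) :
    (if i + w ≤ PySem.List.len cs then PySem.List.slice cs (some i) (some (i + w))
     else PySem.List.slice cs (some i) (some (PySem.List.len cs))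
          ++ List.replicate (w + i - PySem.List.len cs).toNat 'N')
    = pvWindowB cs w i := by
  simp only [pvWindowB, PySem.List.len_eq] at hL ⊢
  by_cases h : i + w ≤ (cs.length : Int)
  · rw [if_pos h]
    have hpad : (w - ((PySem.List.slice cs (some i) (some (i + w))).length : Int)).toNat = 0 := by
      by_cases hw : 0 < w
      · rw [PySem.List.slice_toNat cs h0 (by omega)]
        simp only [List.length_take, List.length_drop]
        omega
      · omega
    rw [hpad]
    simp
  · rw [if_neg h]
    rw [PySem.List.slice_toNat cs h0 (by omega), PySem.List.slice_toNat cs h0 (by omega)]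
    have e1 : List.take (((cs.length : Int)).toNat - i.toNat) (List.drop i.toNat cs)
        = List.drop i.toNat cs := List.take_of_length_le (by simp)
    have e2 : List.take (((i + w)).toNat - i.toNat) (List.drop i.toNat cs)
        = List.drop i.toNat cs := List.take_of_length_le (by simp; omega)
    rw [e1, e2]
    have e3 : (w - ((List.drop i.toNat cs).length : Int)).toNat = (w + i - (cs.length : Int)).toNat := by
      simp only [List.length_drop]
      omega
    rw [e3]

-- A's conditional insert-then-append step is a bare modify (Python's d[k] = d.get(k,[]) + [i]).
lemma step_eq (d : PySem.Dict (List Char) (List Int)) (word : List Char) (i : Int) :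
    (if d.contains word then d else d.insert word []).modify word [] (· ++ [i])
    = d.modify word [] (· ++ [i]) := by
  by_cases h : d.contains word = true
  · rw [if_pos h]
  · have hA : d.contains word = false := eq_false_of_ne_true h
    rw [if_neg (by simp [hA])]
    simp only [PySem.Dict.contains] at hA
    have hall : ∀ p ∈ d.items, ¬((p.1 == word) = true) := by simpa [List.any_eq_false] using hA
    have hf : List.find? (fun p => p.1 == word) d.items = none := List.find?_eq_none.mpr hall
    simp only [PySem.Dict.modify, PySem.Dict.insert, PySem.Dict.getD, PySem.Dict.get?,
      PySem.Dict.contains, hf, hA, List.find?_append, List.map_append,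
      Bool.false_eq_true, if_false, List.any_append, List.any_cons, List.any_nil,
      beq_self_eq_true, Bool.or_false, Bool.false_or, if_true, List.find?_cons,
      Option.none_or]
    have hm : List.map (fun p => if p.1 = word then (word, [i]) else p) d.items = d.items := by
      refine (List.map_congr_left (g := id) fun p hp => ?_).trans (List.map_id _)
      have hne := hall p hp
      simp only [beq_iff_eq] at hne
      simp [hne]
    simp [hm]

-- enumerate over a mapped range pairs each index with its image.
lemma enum_map_pyRange {α : Type} (f : Int → α) (n : Nat) : ∀ (a b : Int), (b - a).toNat = n →
    PySem.List.enumerate ((PySem.List.pyRange a b 1).map f) a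
    = (PySem.List.pyRange a b 1).map (fun i => (i, f i)) := by
  induction n with
  | zero => intro a b hn
            rw [PySem.List.pyRange_one_eq_nil (by omega)]
            simp [PySem.List.enumerate_nil]
  | succ m ih => intro a b hn
                 rw [PySem.List.pyRange_one_cons (by omega)]
                 simp only [List.map_cons, PySem.List.enumerate_cons]
                 rw [ih (a + 1) b (by omega)]

theorem seed_spec_aux (query_seq : String) (w : Int) :
    seed_list_of_query_generating query_seq w = seed_list_of_query_generating_alt query_seq w := by
  dsimp only [seed_list_of_query_generating, seed_list_of_query_generating_alt]
  congr 1
  -- A's loop, with the branched window rewritten to pvWindowB and the step to a bare modify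
  have hA1 : (PySem.List.pyRange 0 (PySem.List.len query_seq.toList) 1).foldl
      (fun (d : PySem.Dict (List Char) (List Int)) i =>
        let word : List Char :=
          if i + w ≤ PySem.List.len query_seq.toList then PySem.List.slice query_seq.toList (some i) (some (i + w))
          else PySem.List.slice query_seq.toList (some i) (some (PySem.List.len query_seq.toList))
               ++ List.replicate (w + i - PySem.List.len query_seq.toList).toNat 'N'
        let d := if d.contains word then d else d.insert word []
        d.modify word [] (· ++ [i])) PySem.Dict.empty
      = (PySem.List.pyRange 0 (PySem.List.len query_seq.toList) 1).foldl
        (fun (d : PySem.Dict (List Char) (List Int)) i => d.modify (pvWindowB query_seq.toList w i) [] (· ++ [i]))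
        PySem.Dict.empty := by
    apply PySem.List.foldl_congr_mem
    intro d i hi
    obtain ⟨h0, hL⟩ := PySem.List.mem_pyRange_one.mp hi
    dsimp only
    rw [window_eq query_seq.toList w i h0 hL, step_eq]
  rw [hA1, ← List.foldl_map (f := fun i => (pvWindowB query_seq.toList w i, i))
        (g := fun (d : PySem.Dict (List Char) (List Int)) p => d.modify p.1 [] (· ++ [p.2]))]
  -- items of A's dict: distinct keys, each with the filtered positions
  have hnd : (((PySem.List.pyRange 0 (PySem.List.len query_seq.toList) 1).map
      (fun i => (pvWindowB query_seq.toList w i, i))).foldl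
      (fun (d : PySem.Dict (List Char) (List Int)) p => d.modify p.1 [] (· ++ [p.2]))
      PySem.Dict.empty).keys.Nodup := by
    exact PySem.Dict.nodup_keys_foldl_modify_key _ _ _ _ _ PySem.Dict.nodup_keys_empty
  rw [PySem.Dict.items_eq_map_keys _ hnd []]
  rw [PySem.Dict.keys_foldl_modify_key]
  -- items of B's dict: a fold of fresh distinct inserts is a map
  rw [PySem.Dict.items_foldl_insert_fresh
        (PySem.List.dedup (List.map (pvWindowB query_seq.toList w) (PySem.List.pyRange 0 (PySem.List.len query_seq.toList) 1)))
        (fun a => a)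
        (fun word => List.map (fun x => x.1) (List.filter (fun p => p.2 == word)
          (PySem.List.enumerate (List.map (pvWindowB query_seq.toList w) (PySem.List.pyRange 0 (PySem.List.len query_seq.toList) 1)) 0)))
        PySem.Dict.empty
        (fun a _ => PySem.Dict.contains_empty a) (by simp)]
  rw [PySem.Dict.keys_empty, PySem.Set.update_nil_left, List.map_map, PySem.List.dedup_eq_ofList]
  simp only [show (PySem.Dict.empty : PySem.Dict (List Char) (List Int)).items = [] from rfl, List.nil_append]
  apply List.map_congr_left
  intro k hk
  rw [PySem.Dict.getD_foldl_modify_append, PySem.Dict.getD_empty, List.nil_append]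
  rw [enum_map_pyRange (pvWindowB query_seq.toList w) (PySem.List.len query_seq.toList).toNat 0 _ (by omega)]
  rw [List.filter_map, List.filter_map, List.map_map, List.map_map]
  simp only [Function.comp_def]

-- ===== VERDICT (by name: the statement is the Claim_ definition above) =====
theorem seed_list_of_query_generating_spec : Claim_equal_seed_list_of_query_generating := by
  intro q w _
  exact seed_spec_aux q w
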